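-- pv_equiv track=rewrite | github.com/forkow/gepiras-gyakorlo | progs/create_word_db.py | syll_join
-- ===== SOURCE A (Python) =====
-- def syll_join(sylls: list[str]) -> str:
--     prefix_hyphen = False
--     result = ""
--     for syll in sylls:
--         if prefix_hyphen:
--             result += '-'
--             prefix_hyphen = False
--         if syll == '-':
--             prefix_hyphen = True
--         else:
--             result += syll
--         result += '-'
--     return result
-- ===== SOURCE B (Python) =====
-- def syll_join(sylls: list[str]) -> str:
--     # Global formulation: '-'.join already reproduces the marker doubling
--     # ("a","-","b" -> "a---b"); appending the final '-' and trimming one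
--     # trailing '-' when the last syllable is itself the marker gives A's value.
--     if not sylls:
--         return ""
--     s = '-'.join(sylls) + '-'
--     return s[:-1] if sylls[-1] == '-' else s
-- ===== Notes on version B (the rewrite author's own statement) =====
-- stated objective: simpler
-- what changed: Replaced A's element-by-element loop carrying a prefix_hyphen flag with a global formulation: one '-'.join over the whole list plus a trailing '-', trimming that trailing '-' exactly when the last syllable is the marker.
import Mathlib
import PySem

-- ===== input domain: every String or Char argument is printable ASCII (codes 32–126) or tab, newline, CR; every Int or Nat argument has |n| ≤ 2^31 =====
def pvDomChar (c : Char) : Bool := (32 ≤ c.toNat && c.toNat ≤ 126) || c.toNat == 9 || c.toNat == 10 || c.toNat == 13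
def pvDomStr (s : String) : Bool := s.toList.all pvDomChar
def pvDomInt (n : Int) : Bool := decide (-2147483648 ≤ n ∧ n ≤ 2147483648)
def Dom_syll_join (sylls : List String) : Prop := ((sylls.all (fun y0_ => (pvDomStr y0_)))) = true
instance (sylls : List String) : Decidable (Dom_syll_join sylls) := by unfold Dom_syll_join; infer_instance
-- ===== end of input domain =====

-- B replaces A's element-by-element stateful loop by one global '-'.join plus a
-- single conditional trim of the trailing '-' (objective: simpler; a timing run also measured it faster, a constant factor from one C-level join).

-- ===== PORT A =====
-- A's loop, state = (prefix_hyphen, result), folded over the syllables in order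
def syll_join (sylls : List String) : String :=
  (sylls.foldl (fun (st : Bool × String) syll =>
      let st1 : Bool × String := if st.1 then (false, st.2 ++ "-") else st
      let st2 : Bool × String := if syll = "-" then (true, st1.2) else (st1.1, st1.2 ++ syll)
      (st2.1, st2.2 ++ "-")) (false, "")).2

-- ===== PORT B =====
-- if not sylls: return ""; s = '-'.join(sylls) + '-'; return s[:-1] if sylls[-1] == '-' else s
-- (sylls[-1] via pyGet? (-1); on the nonempty branch it is always some, getD "" is exact)
def syll_join_alt (sylls : List String) : String :=
  if sylls = [] then ""
  else
    let s := PySem.Str.join "-" sylls ++ "-"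
    if (PySem.List.pyGet? sylls (-1)).getD "" = "-" then PySem.Str.slice s none (some (-1)) else s

-- ===== PRECONDITION & SPEC =====
def Spec_syll_join (sylls : List String) (out : String) : Prop := out = syll_join_alt sylls
instance (sylls : List String) (out : String) : Decidable (Spec_syll_join sylls out) := by unfold Spec_syll_join; infer_instance

-- ===== CLAIM (what is proved, stated in full; the proofs are below) =====
def Claim_equal_syll_join : Prop := ∀ (sylls : List String), Dom_syll_join sylls → Spec_syll_join sylls (syll_join sylls)

-- ===== LEMMAS AND PROOFS =====

-- reference form of A: recursion threading "previous syllable was the marker"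
def pvRest (b : Bool) : List String → String
  | [] => ""
  | s :: t => (if b then "-" else "") ++ (if s = "-" then "" else s) ++ "-" ++ pvRest (s = "-") t

theorem pvA_eq_rest (l : List String) : ∀ (b : Bool) (acc : String),
    (l.foldl (fun (st : Bool × String) syll =>
      let st1 : Bool × String := if st.1 then (false, st.2 ++ "-") else st
      let st2 : Bool × String := if syll = "-" then (true, st1.2) else (st1.1, st1.2 ++ syll)
      (st2.1, st2.2 ++ "-")) (b, acc)).2 = acc ++ pvRest b l := by
  induction l with
  | nil => intro b acc; simp [pvRest]
  | cons s t ih =>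
    intro b acc
    simp only [List.foldl_cons, pvRest]
    by_cases hb : b <;> by_cases hs : s = "-" <;>
      simp [hb, hs, ih, String.append_assoc]

-- the per-element join contribution, at the char-list level
def pvCore : List String → List Char
  | [] => []
  | s :: t => s.toList ++ ['-'] ++ pvCore t

theorem pvRest_eq_core (l : List String) : ∀ (b : Bool),
    (pvRest b l).toList =
      (if l = [] then [] else (if b then ['-'] else [])) ++
        (if l.getLast? = some "-" then (pvCore l).dropLast else pvCore l) := by
  induction l with
  | nil => intro b; simp [pvRest, pvCore]
  | cons s t ih =>
    intro b
    cases t with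
    | nil =>
      by_cases hs : s = "-" <;> by_cases hb : b <;>
        simp [pvRest, pvCore, hs, hb]
    | cons u v =>
      have hcne : pvCore (u :: v) ≠ [] := by simp [pvCore]
      rw [show pvRest b (s :: u :: v) =
            (if b then "-" else "") ++ (if s = "-" then "" else s) ++ "-" ++
              pvRest (s = "-") (u :: v) from rfl]
      simp only [String.toList_append]
      rw [ih]
      rw [show ((s :: u :: v : List String).getLast? = (u :: v : List String).getLast?) by
            simp [List.getLast?_cons_cons]]
      rw [show pvCore (s :: u :: v) = s.toList ++ ['-'] ++ pvCore (u :: v) from rfl]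
      by_cases hl : (u :: v : List String).getLast? = some "-" <;>
        by_cases hs : s = "-" <;> by_cases hb : b <;>
          simp [hs, hb, hl, List.dropLast_append_of_ne_nil, List.dropLast_cons_of_ne_nil, hcne, List.append_assoc]

theorem pvJoin_eq_core (l : List String) (h : l ≠ []) :
    (PySem.Str.join "-" l).toList ++ ['-'] = pvCore l := by
  induction l with
  | nil => exact absurd rfl h
  | cons s t ih =>
    cases t with
    | nil => simp [PySem.Str.toList_join, PySem.Chars.join_singleton, pvCore]
    | cons u v =>
      have : (PySem.Str.join "-" (u :: v)).toList ++ ['-'] = pvCore (u :: v) := ih (by simp)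
      simp only [PySem.Str.toList_join, List.map_cons] at this ⊢
      rw [PySem.Chars.join_cons_cons, pvCore]
      rw [← this]
      simp [List.append_assoc]

-- ===== VERDICT (by name: the statement is the Claim_ definition above) =====
theorem syll_join_spec : Claim_equal_syll_join := by
  intro sylls _
  show syll_join sylls = syll_join_alt sylls
  unfold syll_join syll_join_alt
  rw [pvA_eq_rest]
  cases hsy : sylls with
  | nil => simp [pvRest]
  | cons s t =>
    simp only [if_neg (by simp : (s :: t : List String) ≠ [])]
    apply String.toList_inj.mp
    rw [show ("" ++ pvRest false (s :: t)) = pvRest false (s :: t) by simp]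
    rw [pvRest_eq_core]
    rw [PySem.List.pyGet?_neg_one]
    have hcore := pvJoin_eq_core (s :: t) (by simp)
    have hlast : ((s :: t : List String).getLast?).getD "" = "-" ↔
        (s :: t : List String).getLast? = some "-" := by
      cases hg : (s :: t : List String).getLast? with
      | none => simp [List.getLast?_eq_none_iff] at hg
      | some x => simp
    by_cases hl : (s :: t : List String).getLast? = some "-"
    · rw [if_pos (hlast.mpr hl)]
      rw [PySem.Str.slice_to_neg_one]
      simp only [hl, if_pos, if_neg (by simp : ¬(s :: t : List String) = [])]
      rw [← hcore]
      simp
    · rw [if_neg (fun hc => hl (hlast.mp hc))]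
      simp only [hl, if_neg (by simp : ¬(s :: t : List String) = [])]
      rw [← hcore]
      simp
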